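-- pv_equiv track=rewrite | github.com/Dakshjain1604/git_collab | AI_backend/app/tools/web_search_tool.py | _infer_base_skills
-- ===== SOURCE A (Python) =====
-- from typing import List, Dict, Any, Optional
--
-- def _infer_base_skills(job_title: str) -> List[str]:
--     """Infer basic skills based on job title"""
--     title_lower = job_title.lower()
--
--     base_skills = []
--
--     # Development roles
--     if any(keyword in title_lower for keyword in ['developer', 'engineer', 'programmer']):
--         base_skills.extend(['Problem Solving', 'Code Quality', 'Version Control'])
--
--     # Data roles
--     if any(keyword in title_lower for keyword in ['data', 'analyst', 'scientist']):
--         base_skills.extend(['Data Analysis', 'Statistics', 'SQL'])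
--
--     # Management roles
--     if any(keyword in title_lower for keyword in ['manager', 'lead', 'director']):
--         base_skills.extend(['Leadership', 'Communication', 'Project Management'])
--
--     # Design roles
--     if any(keyword in title_lower for keyword in ['design', 'ux', 'ui']):
--         base_skills.extend(['User Research', 'Prototyping', 'Design Tools'])
--
--     return base_skills
-- ===== SOURCE B (Python) =====
-- from typing import List
--
-- _KEYWORD_BIT = {
--     'developer': 1, 'engineer': 1, 'programmer': 1,
--     'data': 2, 'analyst': 2, 'scientist': 2,
--     'manager': 4, 'lead': 4, 'director': 4,
--     'design': 8, 'ux': 8, 'ui': 8,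
-- }
--
-- _GROUP_SKILLS = [
--     ['Problem Solving', 'Code Quality', 'Version Control'],
--     ['Data Analysis', 'Statistics', 'SQL'],
--     ['Leadership', 'Communication', 'Project Management'],
--     ['User Research', 'Prototyping', 'Design Tools'],
-- ]
--
-- def _infer_base_skills(job_title: str) -> List[str]:
--     title_lower = job_title.lower()
--     mask = 0
--     for keyword, bit in _KEYWORD_BIT.items():
--         if keyword in title_lower:
--             mask |= bit
--     out = []
--     for i, skills in enumerate(_GROUP_SKILLS):
--         if (mask >> i) & 1:
--             out += skills
--     return out
-- ===== Notes on version B (the rewrite author's own statement) =====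
-- stated objective: alternative
-- what changed: Replaces the four unrolled any()/extend branches with a flat keyword-to-bit dictionary folded into an integer bitmask in one pass, then a second pass over the group skill lists selecting groups by bit test.
import Mathlib
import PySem

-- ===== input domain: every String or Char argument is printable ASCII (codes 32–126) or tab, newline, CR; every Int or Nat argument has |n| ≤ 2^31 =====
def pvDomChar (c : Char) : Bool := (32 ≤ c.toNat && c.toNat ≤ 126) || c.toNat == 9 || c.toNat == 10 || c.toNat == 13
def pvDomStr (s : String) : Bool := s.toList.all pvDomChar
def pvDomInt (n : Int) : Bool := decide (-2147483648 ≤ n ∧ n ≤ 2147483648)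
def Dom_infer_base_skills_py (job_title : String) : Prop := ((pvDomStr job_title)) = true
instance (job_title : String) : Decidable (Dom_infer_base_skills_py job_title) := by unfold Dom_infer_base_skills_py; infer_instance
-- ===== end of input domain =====

-- B replaces the four unrolled any()/extend branches with a keyword→bit map folded into a bitmask plus a bit-tested pass over the group skill lists; same values.
-- ===== PORT A =====
def infer_base_skills_py (job_title : String) : List String :=
  let title_lower := PySem.Str.lower job_title
  let base_skills : List String := []
  let base_skills := if ["developer", "engineer", "programmer"].any (fun k => PySem.Str.isIn k title_lower)
    then base_skills ++ ["Problem Solving", "Code Quality", "Version Control"] else base_skills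
  let base_skills := if ["data", "analyst", "scientist"].any (fun k => PySem.Str.isIn k title_lower)
    then base_skills ++ ["Data Analysis", "Statistics", "SQL"] else base_skills
  let base_skills := if ["manager", "lead", "director"].any (fun k => PySem.Str.isIn k title_lower)
    then base_skills ++ ["Leadership", "Communication", "Project Management"] else base_skills
  let base_skills := if ["design", "ux", "ui"].any (fun k => PySem.Str.isIn k title_lower)
    then base_skills ++ ["User Research", "Prototyping", "Design Tools"] else base_skills
  base_skills

-- ===== PORT B =====
def pvKeywordBit : List (String × Int) :=
  [("developer", 1), ("engineer", 1), ("programmer", 1),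
   ("data", 2), ("analyst", 2), ("scientist", 2),
   ("manager", 4), ("lead", 4), ("director", 4),
   ("design", 8), ("ux", 8), ("ui", 8)]

def pvGroupSkills : List (List String) :=
  [["Problem Solving", "Code Quality", "Version Control"],
   ["Data Analysis", "Statistics", "SQL"],
   ["Leadership", "Communication", "Project Management"],
   ["User Research", "Prototyping", "Design Tools"]]

def infer_base_skills_py_alt (job_title : String) : List String :=
  let title_lower := PySem.Str.lower job_title
  let mask := pvKeywordBit.foldl
    (fun m e => if PySem.Str.isIn e.1 title_lower then PySem.Int.bor m e.2 else m) (0 : Int)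
  (PySem.List.enumerate pvGroupSkills).foldl
    (fun out p => if PySem.Int.band (mask >>> p.1.toNat) 1 = 1 then out ++ p.2 else out) []

-- ===== PRECONDITION & SPEC =====
def Spec_infer_base_skills_py (job_title : String) (out : List String) : Prop := out = infer_base_skills_py_alt job_title
instance (job_title : String) (out : List String) : Decidable (Spec_infer_base_skills_py job_title out) := by unfold Spec_infer_base_skills_py; infer_instance

-- ===== CLAIM (what is proved, stated in full; the proofs are below) =====
def Claim_equal_infer_base_skills_py : Prop := ∀ (job_title : String), Dom_infer_base_skills_py job_title → Spec_infer_base_skills_py job_title (infer_base_skills_py job_title)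

-- ===== LEMMAS AND PROOFS =====

-- Both ports are functions of the twelve keyword-membership Booleans; after
-- generalizing those atoms the equality is a finite case analysis closed by `decide`.

-- ===== VERDICT (by name: the statement is the Claim_ definition above) =====
set_option maxHeartbeats 4000000 in
set_option synthInstance.maxHeartbeats 1000000 in
theorem infer_base_skills_py_spec : Claim_equal_infer_base_skills_py := by
  intro job_title _
  unfold Spec_infer_base_skills_py infer_base_skills_py infer_base_skills_py_alt pvKeywordBit
  simp only [List.any_cons, List.any_nil, Bool.or_false, List.foldl_cons, List.foldl_nil]
  generalize PySem.Str.isIn "developer" (PySem.Str.lower job_title) = a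
  generalize PySem.Str.isIn "engineer" (PySem.Str.lower job_title) = b
  generalize PySem.Str.isIn "programmer" (PySem.Str.lower job_title) = c
  generalize PySem.Str.isIn "data" (PySem.Str.lower job_title) = d
  generalize PySem.Str.isIn "analyst" (PySem.Str.lower job_title) = e
  generalize PySem.Str.isIn "scientist" (PySem.Str.lower job_title) = f
  generalize PySem.Str.isIn "manager" (PySem.Str.lower job_title) = g
  generalize PySem.Str.isIn "lead" (PySem.Str.lower job_title) = h
  generalize PySem.Str.isIn "director" (PySem.Str.lower job_title) = i
  generalize PySem.Str.isIn "design" (PySem.Str.lower job_title) = j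
  generalize PySem.Str.isIn "ux" (PySem.Str.lower job_title) = k
  generalize PySem.Str.isIn "ui" (PySem.Str.lower job_title) = l
  revert a b c d e f g h i j k l
  decide
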